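-- pv_equiv track=rewrite | github.com/SCDS-AUB/intro2ds | scripts/sync_lectures.py | remove_first_h1
-- ===== SOURCE A (Python) =====
-- def remove_first_h1(content: str) -> str:
--     """Remove first H1 heading to avoid duplication with frontmatter title."""
--     lines = content.split('\n')
--     result = []
--     removed = False
--     for line in lines:
--         if not removed and line.strip().startswith('# ') and not line.strip().startswith('## '):
--             removed = True
--             continue
--         result.append(line)
--     return '\n'.join(result)
-- ===== SOURCE B (Python) =====
-- def remove_first_h1(content: str) -> str:
--     """Remove first H1 heading by scanning newline positions with str.find and
--     splicing the raw text once; never builds a list of lines."""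
--     start = 0
--     while True:
--         end = content.find('\n', start)
--         line = content[start:] if end == -1 else content[start:end]
--         ls = line.strip()
--         if ls.startswith('# ') and not ls.startswith('## '):
--             if end == -1:
--                 return content[:start - 1] if start else ''
--             return content[:start] + content[end + 1:]
--         if end == -1:
--             return content
--         start = end + 1
-- ===== Notes on version B (the rewrite author's own statement) =====
-- stated objective: alternative
-- what changed: B never builds a list of lines: it walks newline positions in the raw string with str.find(start), and on the first H1 hit returns one splice content[:start] + content[end+1:] (or content[:start-1] for a final line), returning content itself untouched when no H1 exists.
import Mathlib
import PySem

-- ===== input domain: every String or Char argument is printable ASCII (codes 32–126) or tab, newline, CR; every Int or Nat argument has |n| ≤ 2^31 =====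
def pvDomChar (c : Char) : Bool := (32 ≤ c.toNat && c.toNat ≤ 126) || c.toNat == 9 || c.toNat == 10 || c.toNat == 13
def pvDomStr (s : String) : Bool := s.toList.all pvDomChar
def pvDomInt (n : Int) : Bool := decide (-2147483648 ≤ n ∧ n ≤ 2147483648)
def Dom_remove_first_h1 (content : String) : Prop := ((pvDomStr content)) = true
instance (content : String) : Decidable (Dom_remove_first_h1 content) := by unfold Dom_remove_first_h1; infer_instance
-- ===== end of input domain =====

-- B removes the first H1 line by scanning newline positions with str.find and splicing the raw
-- text once, never building a list of lines, instead of A's split / flagged filter loop / join.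

-- the H1 test 'line.strip().startswith('# ') and not line.strip().startswith('## ')' (both sources)
def pvIsH1 (line : List Char) : Bool :=
  PySem.Chars.startswith (PySem.Chars.strip line) ['#', ' ']
    && !(PySem.Chars.startswith (PySem.Chars.strip line) ['#', '#', ' '])

-- ===== PORT A =====
-- the for-loop over the split lines; state is (result, removed)
def pvLoopA : List (List Char) → List (List Char) × Bool → List (List Char) × Bool
  | [], st => st
  | line :: rest, (result, removed) =>
    if !removed && pvIsH1 line then pvLoopA rest (result, true)
    else pvLoopA rest (result ++ [line], removed)

def remove_first_h1 (content : String) : String :=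
  let lines := PySem.Chars.splitOn content.toList ['\n']
  String.ofList (PySem.Chars.join ['\n'] (pvLoopA lines ([], false)).1)

-- ===== PORT B =====
-- the while-loop of Source B, one recursive step per iteration; 'start' stays an Int as in Python,
-- the Nat fuel (length + 1 at the entry point) only makes the recursion structural
def pvScanB (content : List Char) : Nat → Int → List Char
  | 0, _ => content
  | fuel + 1, start =>
    let e := PySem.Chars.findFrom content ['\n'] start
    let line := if e = -1 then PySem.List.slice content (some start) none
                else PySem.List.slice content (some start) (some e)
    if pvIsH1 line then
      if e = -1 then
        if start ≠ 0 then PySem.List.slice content none (some (start - 1)) else []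
      else PySem.List.slice content none (some start) ++ PySem.List.slice content (some (e + 1)) none
    else if e = -1 then content
    else pvScanB content fuel (e + 1)

def remove_first_h1_alt (content : String) : String :=
  String.ofList (pvScanB content.toList (content.toList.length + 1) 0)

-- ===== PRECONDITION & SPEC =====
def Spec_remove_first_h1 (content : String) (out : String) : Prop := out = remove_first_h1_alt content
instance (content : String) (out : String) : Decidable (Spec_remove_first_h1 content out) := by unfold Spec_remove_first_h1; infer_instance

-- ===== CLAIM (what is proved, stated in full; the proofs are below) =====
def Claim_equal_remove_first_h1 : Prop := ∀ (content : String), Dom_remove_first_h1 content → Spec_remove_first_h1 content (remove_first_h1 content)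

-- ===== LEMMAS AND PROOFS =====

-- mathematical split of a char list at '\n' (proof-only; both ports are related to it)
def splitNl : List Char → List (List Char)
  | [] => [[]]
  | c :: rest => if c = '\n' then [] :: splitNl rest
    else match splitNl rest with
      | [] => [[c]]
      | p :: ps => (c :: p) :: ps

-- drop the first H1 line from a line list (proof-only common form)
def rmFirst : List (List Char) → List (List Char)
  | [] => []
  | l :: ls => if pvIsH1 l then ls else l :: rmFirst ls

-- the text made of the given lines, each followed by '\n' (the part of content already scanned)
def pvFlat : List (List Char) → List Char
  | [] => []
  | p :: ps => p ++ '\n' :: pvFlat ps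

lemma splitNl_ne_nil (cs : List Char) : splitNl cs ≠ [] := by
  cases cs with
  | nil => simp [splitNl]
  | cons c rest =>
    simp only [splitNl]
    split
    · simp
    · split <;> simp

lemma go_eq (fuel : Nat) : ∀ (l cur : List Char) (acc : List (List Char)), l.length ≤ fuel →
    PySem.Chars.splitOn.go ['\n'] fuel l cur acc =
      acc.reverse ++ (match splitNl l with
        | [] => [cur.reverse]
        | p :: ps => (cur.reverse ++ p) :: ps) := by
  induction fuel with
  | zero =>
    intro l cur acc h
    have : l = [] := List.eq_nil_of_length_eq_zero (Nat.le_zero.mp h)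
    subst this
    simp [PySem.Chars.splitOn.go, splitNl]
  | succ fuel ih =>
    intro l cur acc h
    cases l with
    | nil => simp [PySem.Chars.splitOn.go, splitNl]
    | cons c rest =>
      rw [PySem.Chars.splitOn.go]
      by_cases hc : c = '\n'
      · subst hc
        have hpre : List.isPrefixOf ['\n'] ('\n' :: rest) = true := by
          simp [List.isPrefixOf]
        simp only [hpre, if_true, List.length_cons, List.length_nil, List.drop_succ_cons,
          List.drop_zero]
        rw [ih rest [] (cur.reverse :: acc) (by simpa using Nat.le_of_succ_le_succ h)]
        simp only [splitNl, if_true]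
        rcases h' : splitNl rest with _ | ⟨p, ps⟩
        · exact absurd h' (splitNl_ne_nil rest)
        · simp
      · have hpre : List.isPrefixOf ['\n'] (c :: rest) = false := by
          simp [List.isPrefixOf]
          intro hh; exact absurd hh.symm hc
        simp only [hpre, Bool.false_eq_true, if_false]
        rw [ih rest (c :: cur) acc (by simpa using Nat.le_of_succ_le_succ h)]
        simp only [splitNl, hc, if_false]
        rcases h' : splitNl rest with _ | ⟨p, ps⟩
        · exact absurd h' (splitNl_ne_nil rest)
        · simp

lemma splitOn_eq_splitNl (cs : List Char) : PySem.Chars.splitOn cs ['\n'] = splitNl cs := by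
  rw [show PySem.Chars.splitOn cs ['\n'] = PySem.Chars.splitOn.go ['\n'] (cs.length + 1) cs [] [] from rfl]
  rw [go_eq (cs.length + 1) cs [] [] (by omega)]
  rcases h' : splitNl cs with _ | ⟨p, ps⟩
  · exact absurd h' (splitNl_ne_nil cs)
  · simp

lemma splitNl_of_not_mem (cs : List Char) (h : '\n' ∉ cs) : splitNl cs = [cs] := by
  induction cs with
  | nil => rfl
  | cons c rest ih =>
    have hc : ¬ c = '\n' := fun hh => h (hh ▸ List.mem_cons_self)
    have hr : '\n' ∉ rest := fun hh => h (List.mem_cons_of_mem _ hh)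
    simp only [splitNl, hc, if_false, ih hr]

lemma splitNl_append (h t : List Char) (hh : '\n' ∉ h) :
    splitNl (h ++ '\n' :: t) = h :: splitNl t := by
  induction h with
  | nil => simp [splitNl]
  | cons c rest ih =>
    have hc : ¬ c = '\n' := fun hx => hh (hx ▸ List.mem_cons_self)
    have hr : '\n' ∉ rest := fun hx => hh (List.mem_cons_of_mem _ hx)
    simp only [List.cons_append, splitNl, hc, if_false, ih hr]

lemma join_splitNl (cs : List Char) : PySem.Chars.join ['\n'] (splitNl cs) = cs := by
  induction cs with
  | nil => simp [splitNl, PySem.Chars.join_singleton]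
  | cons c rest ih =>
    rcases h' : splitNl rest with _ | ⟨p, ps⟩
    · exact absurd h' (splitNl_ne_nil rest)
    · by_cases hc : c = '\n'
      · subst hc
        simp only [splitNl, if_true, h', PySem.Chars.join_cons_cons]
        rw [h'] at ih; simp [ih]
      · simp only [splitNl, hc, if_false, h']
        cases ps with
        | nil =>
          rw [PySem.Chars.join_singleton]
          rw [h', PySem.Chars.join_singleton] at ih
          simp [ih]
        | cons q qs =>
          rw [PySem.Chars.join_cons_cons]
          rw [h', PySem.Chars.join_cons_cons] at ih
          simp [← ih]

lemma join_pvFlat (pls ls : List (List Char)) (h : ls ≠ []) :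
    PySem.Chars.join ['\n'] (pls ++ ls) = pvFlat pls ++ PySem.Chars.join ['\n'] ls := by
  induction pls with
  | nil => simp [pvFlat]
  | cons p rest ih =>
    rcases hx : rest ++ ls with _ | ⟨q, qs⟩
    · rcases List.append_eq_nil_iff.mp hx with ⟨_, h2⟩; exact absurd h2 h
    · calc PySem.Chars.join ['\n'] ((p :: rest) ++ ls)
          = PySem.Chars.join ['\n'] (p :: q :: qs) := by rw [List.cons_append, hx]
        _ = p ++ ['\n'] ++ PySem.Chars.join ['\n'] (q :: qs) := PySem.Chars.join_cons_cons ..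
        _ = p ++ ['\n'] ++ (pvFlat rest ++ PySem.Chars.join ['\n'] ls) := by rw [← hx, ih]
        _ = pvFlat (p :: rest) ++ PySem.Chars.join ['\n'] ls := by simp [pvFlat]

lemma pvFlat_dropLast (pls : List (List Char)) :
    (pvFlat pls).dropLast = PySem.Chars.join ['\n'] pls := by
  induction pls with
  | nil => simp [pvFlat, PySem.Chars.join_nil]
  | cons p rest ih =>
    cases rest with
    | nil => simp [pvFlat, PySem.Chars.join_singleton, List.dropLast_append_of_ne_nil]
    | cons q qs =>
      rw [PySem.Chars.join_cons_cons]
      have hne : '\n' :: pvFlat (q :: qs) ≠ [] := by simp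
      rw [show pvFlat (p :: q :: qs) = p ++ '\n' :: pvFlat (q :: qs) from rfl,
        List.dropLast_append_of_ne_nil hne]
      have : ('\n' :: pvFlat (q :: qs)).dropLast = '\n' :: (pvFlat (q :: qs)).dropLast := by
        have : pvFlat (q :: qs) ≠ [] := by simp [pvFlat]
        cases hq : pvFlat (q :: qs) with
        | nil => exact absurd hq this
        | cons a as => simp
      rw [this, ih]
      simp

lemma pvFlat_append_singleton (pls : List (List Char)) (h : List Char) :
    pvFlat (pls ++ [h]) = pvFlat pls ++ h ++ ['\n'] := by
  induction pls with
  | nil => simp [pvFlat]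
  | cons p rest ih => simp [pvFlat, ih]

lemma rmFirst_of_all (ls : List (List Char)) (h : ls.all (fun l => !pvIsH1 l) = true) :
    rmFirst ls = ls := by
  induction ls with
  | nil => rfl
  | cons l rest ih =>
    simp only [List.all_cons, Bool.and_eq_true, Bool.not_eq_eq_eq_not, Bool.not_true] at h
    simp [rmFirst, h.1, ih h.2]

lemma pvLoopA_true (ls acc : List (List Char)) : pvLoopA ls (acc, true) = (acc ++ ls, true) := by
  induction ls generalizing acc with
  | nil => simp [pvLoopA]
  | cons l rest ih => simp [pvLoopA, ih]

lemma pvLoopA_false (ls acc : List (List Char)) :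
    (pvLoopA ls (acc, false)).1 = acc ++ rmFirst ls := by
  induction ls generalizing acc with
  | nil => simp [pvLoopA, rmFirst]
  | cons l rest ih =>
    by_cases hp : pvIsH1 l
    · simp [pvLoopA, hp, pvLoopA_true, rmFirst]
    · simp [pvLoopA, hp, ih, rmFirst]

-- the single '\n' is not in rest ↔ find = -1
lemma find_nl_neg (rest : List Char) :
    PySem.Chars.find rest ['\n'] = -1 ↔ '\n' ∉ rest := by
  rw [PySem.Chars.find_eq_neg_one_iff]
  constructor
  · intro h hm
    rcases List.append_of_mem hm with ⟨s, t, rfl⟩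
    exact h ⟨s, t, by simp⟩
  · intro h hinf
    rcases hinf with ⟨s, t, hst⟩
    exact h (by rw [← hst]; simp)

-- the B-side loop invariant: scanning the text after an already-clean prefix
lemma scanB_spec : ∀ (fuel : Nat) (pls : List (List Char)) (rest : List Char),
    rest.length < fuel →
    pvScanB (pvFlat pls ++ rest) fuel ((pvFlat pls).length : Int) =
      if (splitNl rest).all (fun l => !pvIsH1 l) then pvFlat pls ++ rest
      else PySem.Chars.join ['\n'] (pls ++ rmFirst (splitNl rest)) := by
  intro fuel
  induction fuel with
  | zero => intro pls rest h; omega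
  | succ fuel ih =>
    intro pls rest hlen
    set F := pvFlat pls with hF
    set n := F.length with hn
    have hncs : n ≤ (F ++ rest).length := by simp [hn]
    rw [show pvScanB (F ++ rest) (fuel + 1) (n : Int) =
        (let e := PySem.Chars.findFrom (F ++ rest) ['\n'] (n : Int);
         let line := if e = -1 then PySem.List.slice (F ++ rest) (some (n : Int)) none
                     else PySem.List.slice (F ++ rest) (some (n : Int)) (some e)
         if pvIsH1 line then
           if e = -1 then
             if (n : Int) ≠ 0 then PySem.List.slice (F ++ rest) none (some ((n : Int) - 1)) else []
           else PySem.List.slice (F ++ rest) none (some (n : Int)) ++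
                PySem.List.slice (F ++ rest) (some (e + 1)) none
         else if e = -1 then F ++ rest
         else pvScanB (F ++ rest) fuel (e + 1)) from rfl]
    rw [PySem.Chars.findFrom_natCast (F ++ rest) ['\n'] n hncs, List.drop_left]
    by_cases hfind : PySem.Chars.find rest ['\n'] = -1
    · -- no newline after the scanned prefix: the current line is all of rest
      have hnm : '\n' ∉ rest := (find_nl_neg rest).mp hfind
      have hsplit : splitNl rest = [rest] := splitNl_of_not_mem rest hnm
      simp only [hfind, hsplit]
      rw [PySem.List.slice_from_natCast (F ++ rest) n, List.drop_left]
      by_cases hp : pvIsH1 rest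
      · simp only [hp, if_true, List.all_cons, List.all_nil, Bool.and_true, Bool.not_true,
          rmFirst, List.append_nil]
        cases pls with
        | nil =>
          simp [PySem.Chars.join_nil]
        | cons p ps =>
          have hFne : F ≠ [] := by rw [hF]; simp [pvFlat]
          have hn1 : 1 ≤ n := by
            rcases List.exists_cons_of_ne_nil hFne with ⟨a, as, ha⟩
            rw [hn, ha]; simp
          have hne0 : (n : Int) ≠ 0 := by omega
          rw [if_pos hne0, show ((n : Int) - 1) = ((n - 1 : Nat) : Int) by omega,
            PySem.List.slice_to_natCast, List.take_append_of_le_length (by omega),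
            show F.take (n - 1) = F.dropLast by rw [List.dropLast_eq_take, hn],
            pvFlat_dropLast]
          simp
      · simp [hp]
    · -- a newline exists: the current line is rest.take kn
      have hk0 : 0 ≤ PySem.Chars.find rest ['\n'] := by
        have := PySem.Chars.neg_one_le_find rest ['\n']; omega
      set k := PySem.Chars.find rest ['\n'] with hk
      set kn := k.toNat with hkn
      have hkcast : k = (kn : Int) := by omega
      have hspec := PySem.Chars.find_spec (s := rest) (sub := ['\n']) hk0
      rw [← hk, ← hkn] at hspec
      obtain ⟨⟨t, ht⟩, hmin⟩ := hspec
      have hklen : kn < rest.length := by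
        by_contra hge
        rw [List.drop_eq_nil_of_le (by omega)] at ht
        simp at ht
      have hdropkn : rest.drop kn = '\n' :: rest.drop (kn + 1) := by
        have h1 : rest.drop kn = '\n' :: t := by rw [← ht]; rfl
        have h2 : rest.drop (kn + 1) = t := by
          have h3 := congrArg List.tail h1
          rwa [List.tail_drop] at h3
        rw [h1, h2]
      set head := rest.take kn with hhead
      set tail := rest.drop (kn + 1) with htail
      have hrest : rest = head ++ '\n' :: tail := by
        rw [hhead, htail, ← hdropkn, List.take_append_drop]
      have hnmhead : '\n' ∉ head := by
        intro hm
        obtain ⟨i, hi, hgi⟩ := List.getElem_of_mem hm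
        have hi' : i < kn := by
          have := hi; rw [hhead] at this; simp at this; omega
        apply hmin i hi'
        have hgi' : rest[i]'(by omega) = '\n' := by
          rw [← hgi]; exact List.getElem_take.symm
        rw [List.drop_eq_getElem_cons (by omega : i < rest.length), hgi']
        exact ⟨rest.drop (i + 1), rfl⟩
      have hsplit : splitNl rest = head :: splitNl tail := by
        rw [hrest]; exact splitNl_append head tail hnmhead
      have hne : ¬ ((n : Int) + k = -1) := by omega
      simp only [hfind, if_neg hne, if_false]
      -- the current line is head
      have hline : PySem.List.slice (F ++ rest) (some (n : Int)) (some ((n : Int) + k)) = head := by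
        rw [hkcast, show ((n : Int) + (kn : Int)) = ((n + kn : Nat) : Int) by omega,
          PySem.List.slice_natCast, List.drop_left, Nat.add_sub_cancel_left, hhead]
      rw [hline]
      have hcs2 : F ++ rest = (F ++ head ++ ['\n']) ++ tail := by
        rw [hrest]; simp
      by_cases hp : pvIsH1 head
      · -- splice the line out: content[:start] ++ content[end+1:]
        simp only [hp, if_true]
        rw [show ((n : Int)) = ((n : Nat) : Int) from rfl, PySem.List.slice_to_natCast,
          List.take_left' hn.symm,
          show ((n : Int) + k + 1) = ((n + kn + 1 : Nat) : Int) by omega,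
          PySem.List.slice_from_natCast]
        rw [hcs2, List.drop_left' (by simp [hn, hhead]; omega)]
        rw [hsplit]
        have hall : ((head :: splitNl tail).all fun l => !pvIsH1 l) = false := by
          simp [hp]
        simp only [hall, Bool.false_eq_true, if_false, rmFirst, hp, if_true]
        rw [join_pvFlat pls (splitNl tail) (splitNl_ne_nil tail), join_splitNl, ← hF]
      · -- clean line: advance past its newline
        simp only [hp, if_false, Bool.false_eq_true]
        have hflat : pvFlat (pls ++ [head]) = F ++ head ++ ['\n'] := by
          rw [pvFlat_append_singleton, hF]
        have hlen2 : (pvFlat (pls ++ [head])).length = n + kn + 1 := by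
          rw [hflat]; simp [hn, hhead]; omega
        have htlen : tail.length < fuel := by
          have h1 : tail.length + (kn + 1) = rest.length := by
            rw [htail]; rw [List.length_drop]; omega
          omega
        have hihx := ih (pls ++ [head]) tail htlen
        rw [hlen2, hflat, ← hcs2] at hihx
        rw [show ((n : Int) + k + 1) = ((n + kn + 1 : Nat) : Int) by omega, hihx, hsplit]
        have hallc : ((head :: splitNl tail).all fun l => !pvIsH1 l) =
            ((splitNl tail).all fun l => !pvIsH1 l) := by
          simp [hp]
        rw [hallc]
        by_cases hall : ((splitNl tail).all fun l => !pvIsH1 l) = true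
        · rw [if_pos hall, if_pos hall, hcs2]
        · rw [if_neg hall, if_neg hall, rmFirst, if_neg hp]
          congr 1
          simp

-- ===== VERDICT (by name: the statement is the Claim_ definition above) =====
theorem remove_first_h1_spec : Claim_equal_remove_first_h1 := by
  intro content _
  unfold Spec_remove_first_h1 remove_first_h1 remove_first_h1_alt
  dsimp only
  set cs := content.toList with hcs
  rw [splitOn_eq_splitNl, pvLoopA_false, List.nil_append]
  have hb := scanB_spec (cs.length + 1) [] cs (by omega)
  simp only [pvFlat, List.nil_append, List.length_nil, Nat.cast_zero] at hb
  rw [hb]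
  by_cases h : (splitNl cs).all (fun l => !pvIsH1 l)
  · rw [if_pos h, rmFirst_of_all _ h, join_splitNl]
  · rw [if_neg h]
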